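-- pv_equiv track=rewrite | github.com/MikunsHub/genComb | core/utils.py | rand
-- ===== SOURCE A (Python) =====
-- def rand(fxd1,fxd2,var1,var2,var3):
--     res=[]
--     for i in var1:
--         for j in var2:
--             for k in var3:
--                 if fxd2 < i and i < j and j < k:
--                     res.append(fxd1*100000000 + fxd2*1000000 + i*10000 + j*100 + k)
--     return res
-- ===== SOURCE B (Python) =====
-- def rand(fxd1, fxd2, var1, var2, var3):
--     # Precompute, for each j in var2, the encoded tails j*100+k for k in var3 with j < k.
--     base = fxd1 * 100000000 + fxd2 * 1000000
--     jk = [(j, [j * 100 + k for k in var3 if j < k]) for j in var2]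
--     res = []
--     for i in var1:
--         if fxd2 < i:
--             off = base + i * 10000
--             for j, tails in jk:
--                 if i < j:
--                     for t in tails:
--                         res.append(off + t)
--     return res
-- ===== Notes on version B (the rewrite author's own statement) =====
-- stated objective: faster
-- what changed: Replaces the triple nested scan with a precomputed per-j list of encoded (j,k) tails and hoists the fxd2<i and i<j tests out of the inner loops; intended as faster (O(n2*n3 + n1*n2 + output) vs O(n1*n2*n3)); a timing run measured 11.07x at the largest size both finished but could not confirm at the top size, where the output itself is huge.
import Mathlib
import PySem

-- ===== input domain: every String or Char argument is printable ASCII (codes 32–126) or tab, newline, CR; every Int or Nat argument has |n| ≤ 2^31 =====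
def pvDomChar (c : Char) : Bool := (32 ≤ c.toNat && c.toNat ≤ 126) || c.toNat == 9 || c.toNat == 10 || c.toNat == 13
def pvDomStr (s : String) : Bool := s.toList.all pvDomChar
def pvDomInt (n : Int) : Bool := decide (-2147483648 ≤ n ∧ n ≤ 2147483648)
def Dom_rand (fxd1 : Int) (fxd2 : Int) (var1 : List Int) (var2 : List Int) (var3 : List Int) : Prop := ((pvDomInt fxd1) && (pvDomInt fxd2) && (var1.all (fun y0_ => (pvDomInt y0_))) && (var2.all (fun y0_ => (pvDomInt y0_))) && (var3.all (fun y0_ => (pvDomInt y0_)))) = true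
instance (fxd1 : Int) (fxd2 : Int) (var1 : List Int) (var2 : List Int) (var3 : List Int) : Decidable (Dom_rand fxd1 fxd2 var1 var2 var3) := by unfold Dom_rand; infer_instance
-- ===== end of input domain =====

-- ===== PORT A =====
def rand (fxd1 : Int) (fxd2 : Int) (var1 : List Int) (var2 : List Int) (var3 : List Int) : List Int :=
  var1.foldl (fun res i =>
    var2.foldl (fun res j =>
      var3.foldl (fun res k =>
        if fxd2 < i ∧ i < j ∧ j < k then
          res ++ [fxd1 * 100000000 + fxd2 * 1000000 + i * 10000 + j * 100 + k]
        else res) res) res) []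

-- ===== PORT B =====
-- B precomputes encoded (j,k) tails per j and hoists the fxd2<i and i<j tests out of the inner
-- loops (intended as faster; a timing run measured 11x at the largest size both finished).
def rand_alt (fxd1 : Int) (fxd2 : Int) (var1 : List Int) (var2 : List Int) (var3 : List Int) : List Int :=
  let base := fxd1 * 100000000 + fxd2 * 1000000
  let jk := var2.map (fun j => (j, (var3.filter (fun k => j < k)).map (fun k => j * 100 + k)))
  var1.foldl (fun res i =>
    if fxd2 < i then
      let off := base + i * 10000
      jk.foldl (fun res p =>
        if i < p.1 then res ++ p.2.map (fun t => off + t) else res) res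
    else res) []

-- ===== PRECONDITION & SPEC =====
def Spec_rand (fxd1 : Int) (fxd2 : Int) (var1 : List Int) (var2 : List Int) (var3 : List Int) (out : List Int) : Prop := out = rand_alt fxd1 fxd2 var1 var2 var3
instance (fxd1 : Int) (fxd2 : Int) (var1 : List Int) (var2 : List Int) (var3 : List Int) (out : List Int) : Decidable (Spec_rand fxd1 fxd2 var1 var2 var3 out) := by unfold Spec_rand; infer_instance

-- ===== CLAIM (what is proved, stated in full; the proofs are below) =====
def Claim_equal_rand : Prop := ∀ (fxd1 : Int) (fxd2 : Int) (var1 : List Int) (var2 : List Int) (var3 : List Int), Dom_rand fxd1 fxd2 var1 var2 var3 → Spec_rand fxd1 fxd2 var1 var2 var3 (rand fxd1 fxd2 var1 var2 var3)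

-- ===== LEMMAS AND PROOFS =====

-- ===== VERDICT (by name: the statement is the Claim_ definition above) =====
lemma rand_A_flat (fxd1 fxd2 : Int) (var1 var2 var3 : List Int) :
    rand fxd1 fxd2 var1 var2 var3 =
      var1.flatMap (fun i => var2.flatMap (fun j =>
        (var3.filter (fun k => decide (fxd2 < i ∧ i < j ∧ j < k))).map
          (fun k => fxd1 * 100000000 + fxd2 * 1000000 + i * 10000 + j * 100 + k))) := by
  unfold rand
  simp only [PySem.List.foldl_append_ite, PySem.List.foldl_append_eq_flatMap, List.nil_append]

lemma rand_B_flat (fxd1 fxd2 : Int) (var1 var2 var3 : List Int) :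
    rand_alt fxd1 fxd2 var1 var2 var3 =
      var1.flatMap (fun i =>
        if fxd2 < i then
          (var2.map (fun j => (j, (var3.filter (fun k => j < k)).map (fun k => j * 100 + k)))).flatMap
            (fun p => if i < p.1 then
                p.2.map (fun t => fxd1 * 100000000 + fxd2 * 1000000 + i * 10000 + t)
              else [])
        else []) := by
  unfold rand_alt
  have h1 : ∀ (i : Int) (jk : List (Int × List Int)) (res : List Int),
      jk.foldl (fun res p =>
        if i < p.1 then res ++ p.2.map (fun t => fxd1 * 100000000 + fxd2 * 1000000 + i * 10000 + t) else res) res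
      = res ++ jk.flatMap (fun p => if i < p.1 then
          p.2.map (fun t => fxd1 * 100000000 + fxd2 * 1000000 + i * 10000 + t) else []) := by
    intro i jk res
    rw [PySem.List.foldl_congr_mem (g := fun res p =>
      res ++ (if i < p.1 then p.2.map (fun t => fxd1 * 100000000 + fxd2 * 1000000 + i * 10000 + t) else []))]
    · exact PySem.List.foldl_append_eq_flatMap _ _ _
    · intro acc p _; split <;> simp
  simp only [h1]
  rw [PySem.List.foldl_congr_mem (g := fun res i =>
    res ++ (if fxd2 < i then
      (var2.map (fun j => (j, (var3.filter (fun k => j < k)).map (fun k => j * 100 + k)))).flatMap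
        (fun p => if i < p.1 then
            p.2.map (fun t => fxd1 * 100000000 + fxd2 * 1000000 + i * 10000 + t)
          else [])
      else []))]
  · rw [PySem.List.foldl_append_eq_flatMap]; simp
  · intro acc i _; split <;> simp

theorem rand_spec : Claim_equal_rand := by
  intro fxd1 fxd2 var1 var2 var3 _
  unfold Spec_rand
  rw [rand_A_flat, rand_B_flat]
  apply List.flatMap_congr
  intro i _
  by_cases hi : fxd2 < i
  · rw [if_pos hi, List.flatMap_map]
    apply List.flatMap_congr
    intro j _
    by_cases hj : i < j
    · rw [if_pos hj, List.map_map]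
      have hf : (fun k => decide (fxd2 < i ∧ i < j ∧ j < k)) = (fun k : Int => decide (j < k)) := by
        funext k; simp [hi, hj]
      rw [hf]
      apply List.map_congr_left
      intro k _
      simp; ring
    · rw [if_neg hj]
      have hf : ∀ k : Int, (decide (fxd2 < i ∧ i < j ∧ j < k)) = false := by
        intro k; simp [hj]
      simp [hf]
  · rw [if_neg hi]
    have hf : ∀ j k : Int, (decide (fxd2 < i ∧ i < j ∧ j < k)) = false := by
      intro j k; simp [hi]
    simp [hf]
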